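-- pv_equiv track=rewrite | github.com/MGX-Studios/PDF-Miner | pdf_minner.py | detect_watermark_candidates_with_counts
-- ===== SOURCE A (Python) =====
-- def _normalize_line(s: str) -> str:
--     return " ".join(s.strip().split())
--
-- def detect_watermark_candidates_with_counts(pages: list[str]) -> list[tuple[str, int]]:
--     import collections
--     n = len(pages)
--     counts = collections.Counter()
--     for p in pages:
--         seen = set()
--         for raw in p.splitlines():
--             s = _normalize_line(raw)
--             if not s or len(s) > 60 or len(s) < 2 or s.isdigit():
--                 continue
--             seen.add(s)
--         for s in seen:
--             counts[s] += 1
--     items = [(s, c) for s, c in counts.items()]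
--     items.sort(key=lambda t: (-t[1], t[0]))
--     return items
-- ===== SOURCE B (Python) =====
-- def detect_watermark_candidates_with_counts(pages: list[str]) -> list[tuple[str, int]]:
--     pairs = []
--     for i, p in enumerate(pages):
--         for raw in p.splitlines():
--             s = " ".join(raw.strip().split())
--             if s and 2 <= len(s) <= 60 and not s.isdigit():
--                 pairs.append((s, i))
--     pairs = sorted(set(pairs))
--     items = []
--     prev = None
--     cnt = 0
--     for s, _ in pairs:
--         if s == prev:
--             cnt += 1
--         else:
--             if prev is not None:
--                 items.append((prev, cnt))
--             prev = s
--             cnt = 1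
--     if prev is not None:
--         items.append((prev, cnt))
--     items.sort(key=lambda t: (-t[1], t[0]))
--     return items
-- ===== Notes on version B (the rewrite author's own statement) =====
-- stated objective: alternative
-- what changed: Replaces A's per-page dedup set plus a Counter dictionary by a sort-then-scan pipeline: collect (line, page) pairs, deduplicate, sort them lexicographically and count runs of equal lines in one linear scan; no per-page set and no counting dictionary are maintained.
import Mathlib
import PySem

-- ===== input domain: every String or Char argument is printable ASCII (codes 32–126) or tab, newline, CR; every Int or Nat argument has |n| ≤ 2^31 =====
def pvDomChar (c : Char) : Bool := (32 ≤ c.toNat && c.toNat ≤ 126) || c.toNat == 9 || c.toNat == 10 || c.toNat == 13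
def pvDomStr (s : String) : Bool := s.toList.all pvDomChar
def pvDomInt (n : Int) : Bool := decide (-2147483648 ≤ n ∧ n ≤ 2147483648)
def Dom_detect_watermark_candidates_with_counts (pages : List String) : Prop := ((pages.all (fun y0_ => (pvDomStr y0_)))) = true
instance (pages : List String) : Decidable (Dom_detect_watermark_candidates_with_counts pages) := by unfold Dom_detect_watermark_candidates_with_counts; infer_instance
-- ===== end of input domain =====

-- B replaces A's per-page dedup set + Counter by sort-then-scan over (line, page) pairs: alternative algorithm, same result.

-- ===== PORT A =====
-- _normalize_line(s) = " ".join(s.strip().split())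
def pvNorm (s : String) : String :=
  PySem.Str.join " " (PySem.Str.split₀ (PySem.Str.strip s))

-- A: per page, a set `seen` of valid normalized lines, then counts[s] += 1 for each;
-- finally items sorted by key (-count, line).  (the local `s = _normalize_line(raw)` is inlined)
def detect_watermark_candidates_with_counts (pages : List String) : List (String × Int) :=
  PySem.List.sorted2
    (pages.foldl (fun counts p =>
      ((PySem.Str.splitlines p).foldl (fun seen raw =>
          if pvNorm raw = "" ∨ 60 < PySem.Str.len (pvNorm raw) ∨ PySem.Str.len (pvNorm raw) < 2 ∨ PySem.Str.strIsdigit (pvNorm raw)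
          then seen
          else PySem.Set.add seen (pvNorm raw)) PySem.Set.empty).foldl
        (fun c s => c.modify s 0 (· + 1)) counts) PySem.Dict.empty).items
    (fun t => -t.2) (fun t => t.1)

-- ===== PORT B =====
-- B: collect (normalized line, page index) pairs, dedupe with set(), sort lexicographically,
-- count runs of equal lines with a (items, prev, cnt) scan, then sort by (-count, line).
def detect_watermark_candidates_with_counts_alt (pages : List String) : List (String × Int) :=
  let pairs := ((PySem.List.enumerate pages).foldl (fun acc ip =>
      (PySem.Str.splitlines ip.2).foldl (fun acc raw =>
        if pvNorm raw ≠ "" ∧ 2 ≤ PySem.Str.len (pvNorm raw) ∧ PySem.Str.len (pvNorm raw) ≤ 60 ∧ ¬ PySem.Str.strIsdigit (pvNorm raw)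
        then acc ++ [(pvNorm raw, ip.1)] else acc) acc) [])
  let spairs := PySem.List.sorted2 (PySem.Set.ofList pairs) (fun t => t.1) (fun t => t.2)
  let st := spairs.foldl (fun st si =>
      if st.2.1 = some si.1 then (st.1, st.2.1, st.2.2 + 1)
      else ((match st.2.1 with | none => st.1 | some q => st.1 ++ [(q, st.2.2)]), some si.1, (1 : Int)))
    (([] : List (String × Int)), (none : Option String), (0 : Int))
  let items := match st.2.1 with | none => st.1 | some q => st.1 ++ [(q, st.2.2)]
  PySem.List.sorted2 items (fun t => -t.2) (fun t => t.1)

-- ===== PRECONDITION & SPEC =====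
def Spec_detect_watermark_candidates_with_counts (pages : List String) (out : List (String × Int)) : Prop := out = detect_watermark_candidates_with_counts_alt pages
instance (pages : List String) (out : List (String × Int)) : Decidable (Spec_detect_watermark_candidates_with_counts pages out) := by unfold Spec_detect_watermark_candidates_with_counts; infer_instance

-- ===== CLAIM (what is proved, stated in full; the proofs are below) =====
def Claim_equal_detect_watermark_candidates_with_counts : Prop := ∀ (pages : List String), Dom_detect_watermark_candidates_with_counts pages → Spec_detect_watermark_candidates_with_counts pages (detect_watermark_candidates_with_counts pages)

-- ===== LEMMAS AND PROOFS =====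

-- the list of normalized lines of one page that pass the filter (with duplicates, in order)
def pvValid (lines : List String) : List String :=
  lines.filterMap (fun raw =>
    if pvNorm raw = "" ∨ 60 < PySem.Str.len (pvNorm raw) ∨ PySem.Str.len (pvNorm raw) < 2 ∨ PySem.Str.strIsdigit (pvNorm raw)
    then none else some (pvNorm raw))

def pvLines (p : String) : List String := pvValid (PySem.Str.splitlines p)

-- the count A and B both compute for a line s: on how many pages s occurs as a valid line
def pvCnt (pages : List String) (s : String) : Int :=
  (pages.countP (fun p => decide (s ∈ pvLines p)) : Int)

-- A's keep/drop test and B's keep test are complementary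
lemma pv_cond (s : String) :
    (s ≠ "" ∧ 2 ≤ PySem.Str.len s ∧ PySem.Str.len s ≤ 60 ∧ ¬ PySem.Str.strIsdigit s)
    ↔ ¬(s = "" ∨ 60 < PySem.Str.len s ∨ PySem.Str.len s < 2 ∨ PySem.Str.strIsdigit s) := by
  rw [not_or, not_or, not_or]
  exact ⟨fun ⟨h1, h2, h3, h4⟩ => ⟨h1, by omega, by omega, h4⟩,
         fun ⟨h1, h2, h3, h4⟩ => ⟨h1, by omega, by omega, h4⟩⟩

-- A's guarded inner loop is a fold over the valid lines
lemma pv_inner_A {δ : Type} (lines : List String) (f : δ → String → δ) (d : δ) :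
    lines.foldl (fun d raw =>
      if pvNorm raw = "" ∨ 60 < PySem.Str.len (pvNorm raw) ∨ PySem.Str.len (pvNorm raw) < 2 ∨ PySem.Str.strIsdigit (pvNorm raw)
      then d else f d (pvNorm raw)) d
    = (pvValid lines).foldl f d := by
  induction lines generalizing d with
  | nil => simp only [List.foldl_nil, pvValid, List.filterMap_nil]
  | cons x t ih =>
    simp only [pvValid, List.filterMap_cons, List.foldl_cons]
    split_ifs with h
    · exact ih d
    · simp only [List.foldl_cons]; exact ih (f d (pvNorm x))

-- B's guarded pair-collecting loop appends one pair per valid line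
lemma pv_inner_B (lines : List String) (i : Int) (acc : List (String × Int)) :
    lines.foldl (fun acc raw =>
      if pvNorm raw ≠ "" ∧ 2 ≤ PySem.Str.len (pvNorm raw) ∧ PySem.Str.len (pvNorm raw) ≤ 60 ∧ ¬ PySem.Str.strIsdigit (pvNorm raw)
      then acc ++ [(pvNorm raw, i)] else acc) acc
    = acc ++ (pvValid lines).map (fun s => (s, i)) := by
  induction lines generalizing acc with
  | nil => simp only [List.foldl_nil, pvValid, List.filterMap_nil, List.map_nil, List.append_nil]
  | cons x t ih =>
    simp only [pvValid, List.filterMap_cons, List.foldl_cons]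
    by_cases h : pvNorm x = "" ∨ 60 < PySem.Str.len (pvNorm x) ∨ PySem.Str.len (pvNorm x) < 2 ∨ PySem.Str.strIsdigit (pvNorm x)
    · rw [if_neg (by rw [pv_cond]; exact not_not_intro h), if_pos h]
      exact ih acc
    · rw [if_pos ((pv_cond _).mpr h), if_neg h]
      simp only [List.map_cons]
      rw [ih (acc ++ [(pvNorm x, i)])]
      simp only [pvValid, List.append_assoc, List.singleton_append]

-- all (valid line, page index) pairs, page by page
def pvAllPairs (pages : List String) : List (String × Int) :=
  (PySem.List.enumerate pages).flatMap (fun ip => (pvLines ip.2).map (fun s => (s, ip.1)))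

lemma pv_pairs (pages : List String) :
    ((PySem.List.enumerate pages).foldl (fun acc ip =>
      (PySem.Str.splitlines ip.2).foldl (fun acc raw =>
        if pvNorm raw ≠ "" ∧ 2 ≤ PySem.Str.len (pvNorm raw) ∧ PySem.Str.len (pvNorm raw) ≤ 60 ∧ ¬ PySem.Str.strIsdigit (pvNorm raw)
        then acc ++ [(pvNorm raw, ip.1)] else acc) acc) [])
    = pvAllPairs pages := by
  unfold pvAllPairs
  have gen : ∀ (l : List (Int × String)) (acc : List (String × Int)),
      (l.foldl (fun acc ip =>
        (PySem.Str.splitlines ip.2).foldl (fun acc raw =>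
          if pvNorm raw ≠ "" ∧ 2 ≤ PySem.Str.len (pvNorm raw) ∧ PySem.Str.len (pvNorm raw) ≤ 60 ∧ ¬ PySem.Str.strIsdigit (pvNorm raw)
          then acc ++ [(pvNorm raw, ip.1)] else acc) acc) acc)
      = acc ++ l.flatMap (fun ip => (pvLines ip.2).map (fun s => (s, ip.1))) := by
    intro l
    induction l with
    | nil => intro acc; rw [List.foldl_nil, List.flatMap_nil, List.append_nil]
    | cons ip t ih =>
      intro acc
      rw [List.foldl_cons, List.flatMap_cons, pv_inner_B, ih, List.append_assoc]
      rfl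
  exact (gen (PySem.List.enumerate pages) []).trans (by rw [List.nil_append])


-- ---------- A side: the Counter fold ----------
def pvFoldA (pages : List String) (d : PySem.Dict String Int) : PySem.Dict String Int :=
  pages.foldl (fun counts p =>
    ((PySem.Str.splitlines p).foldl (fun seen raw =>
        if pvNorm raw = "" ∨ 60 < PySem.Str.len (pvNorm raw) ∨ PySem.Str.len (pvNorm raw) < 2 ∨ PySem.Str.strIsdigit (pvNorm raw)
        then seen
        else PySem.Set.add seen (pvNorm raw)) PySem.Set.empty).foldl
      (fun c s => c.modify s 0 (· + 1)) counts) d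

-- the per-page `seen` set is set(valid lines of p)
lemma pv_seen (p : String) :
    ((PySem.Str.splitlines p).foldl (fun seen raw =>
        if pvNorm raw = "" ∨ 60 < PySem.Str.len (pvNorm raw) ∨ PySem.Str.len (pvNorm raw) < 2 ∨ PySem.Str.strIsdigit (pvNorm raw)
        then seen
        else PySem.Set.add seen (pvNorm raw)) PySem.Set.empty)
    = PySem.Set.ofList (pvLines p) := by
  rw [pv_inner_A]
  exact (PySem.Set.ofList_eq_foldl _).symm

lemma pv_add_of_mem {α : Type} [BEq α] [LawfulBEq α] (s : PySem.Set α) (x : α) (hx : x ∈ s) :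
    PySem.Set.add s x = s := by simp [PySem.Set.add, hx]

lemma pv_add_of_not_mem {α : Type} [BEq α] [LawfulBEq α] (s : PySem.Set α) (x : α) (hx : x ∉ s) :
    PySem.Set.add s x = s ++ [x] := by simp [PySem.Set.add, hx]

lemma pv_mem_update_iff {α : Type} [BEq α] [LawfulBEq α] (t : List α) (s : PySem.Set α) (x : α) :
    x ∈ PySem.Set.update s t ↔ x ∈ s ∨ x ∈ t := by
  induction t generalizing s with
  | nil => simp [PySem.Set.update]
  | cons y t ih =>
    show x ∈ PySem.Set.update (PySem.Set.add s y) t ↔ _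
    rw [ih, PySem.Set.mem_add]
    simp [List.mem_cons]
    tauto

lemma pv_update_add {α : Type} [BEq α] [LawfulBEq α] (t : List α) (s : PySem.Set α) (x : α) :
    PySem.Set.update s (PySem.Set.add t x) = PySem.Set.add (PySem.Set.update s t) x := by
  by_cases hxt : x ∈ t
  · rw [pv_add_of_mem t x hxt, pv_add_of_mem _ x ((pv_mem_update_iff t s x).mpr (Or.inr hxt))]
  · rw [pv_add_of_not_mem t x hxt]
    show List.foldl PySem.Set.add s (t ++ [x]) = _
    rw [List.foldl_append]
    rfl

lemma pv_update_update {α : Type} [BEq α] [LawfulBEq α] (l : List α) (t s : PySem.Set α) :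
    PySem.Set.update s (PySem.Set.update t l) = PySem.Set.update (PySem.Set.update s t) l := by
  induction l generalizing t s with
  | nil => rfl
  | cons x l ih =>
    show PySem.Set.update s (PySem.Set.update (PySem.Set.add t x) l)
        = PySem.Set.update (PySem.Set.update s t) (x :: l)
    rw [ih]
    show _ = PySem.Set.update (PySem.Set.add (PySem.Set.update s t) x) l
    rw [pv_update_add]

-- updating with set(l) updates the same keys as updating with l itself
lemma pv_update_ofList {α : Type} [BEq α] [LawfulBEq α] (l : List α) (s : PySem.Set α) :
    PySem.Set.update s (PySem.Set.ofList l) = PySem.Set.update s l := by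
  have h0 : PySem.Set.ofList l = PySem.Set.update [] l := rfl
  rw [h0, pv_update_update]
  rfl

-- the keys A accumulates, page by page
def pvKeysA (pages : List String) : PySem.Set String :=
  pages.foldl (fun ks p => PySem.Set.update ks (pvLines p)) []

lemma pv_foldA_cons (p : String) (t : List String) (d : PySem.Dict String Int) :
    pvFoldA (p :: t) d
    = pvFoldA t ((PySem.Set.ofList (pvLines p)).foldl (fun c s => c.modify s 0 (· + 1)) d) := by
  show pvFoldA t (List.foldl (fun c s => PySem.Dict.modify c s 0 (· + 1)) d
      ((PySem.Str.splitlines p).foldl (fun seen raw =>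
        if pvNorm raw = "" ∨ 60 < PySem.Str.len (pvNorm raw) ∨ PySem.Str.len (pvNorm raw) < 2 ∨ PySem.Str.strIsdigit (pvNorm raw)
        then seen
        else PySem.Set.add seen (pvNorm raw)) PySem.Set.empty)) = _
  rw [pv_seen]

lemma pv_foldA_keys (pages : List String) (d : PySem.Dict String Int) :
    (pvFoldA pages d).keys = pages.foldl (fun ks p => PySem.Set.update ks (pvLines p)) d.keys := by
  induction pages generalizing d with
  | nil => rfl
  | cons p t ih =>
    rw [pv_foldA_cons, ih, List.foldl_cons,
        PySem.Dict.keys_foldl_modify _ _ (fun _ _ => (· + 1)), pv_update_ofList]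

lemma pv_foldA_nodup (pages : List String) (d : PySem.Dict String Int)
    (h : d.keys.Nodup) : (pvFoldA pages d).keys.Nodup := by
  induction pages generalizing d with
  | nil => exact h
  | cons p t ih =>
    rw [pv_foldA_cons]
    exact ih _ (PySem.Dict.nodup_keys_foldl_modify_key _ (fun x => x) _ (fun _ _ => (· + 1)) _ h)

lemma pv_foldA_getD (pages : List String) (d : PySem.Dict String Int) (s : String) :
    (pvFoldA pages d).getD s 0 = d.getD s 0 + pvCnt pages s := by
  induction pages generalizing d with
  | nil =>
    show d.getD s 0 = d.getD s 0 + ((List.countP (fun p => decide (s ∈ pvLines p)) [] : Nat) : Int)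
    simp only [List.countP_nil, Nat.cast_zero, add_zero]
  | cons p t ih =>
    rw [pv_foldA_cons, ih, PySem.Dict.getD_foldl_modify_add_one]
    have hcnt : pvCnt (p :: t) s
        = (if s ∈ pvLines p then 1 else 0) + pvCnt t s := by
      unfold pvCnt
      rw [List.countP_cons]
      by_cases h : s ∈ pvLines p
      · rw [if_pos h]
        simp only [h, decide_true, if_pos]
        push_cast; ring
      · rw [if_neg h]
        simp only [h, decide_false]
        push_cast; ring
    rw [hcnt]
    by_cases h : s ∈ pvLines p
    · rw [List.count_eq_one_of_mem (PySem.Set.nodup_ofList _) ((PySem.Set.mem_ofList _ _).mpr h),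
          if_pos h]
      push_cast; ring
    · rw [List.count_eq_zero.mpr (fun hx => h ((PySem.Set.mem_ofList _ _).mp hx)), if_neg h]
      push_cast; ring

lemma pv_mem_keysA (pages : List String) (s : String) :
    s ∈ pvKeysA pages ↔ ∃ p ∈ pages, s ∈ pvLines p := by
  have gen : ∀ (f : String → List String) (l : List String) (ks : PySem.Set String),
      (s ∈ l.foldl (fun ks p => PySem.Set.update ks (f p)) ks ↔ s ∈ ks ∨ ∃ p ∈ l, s ∈ f p) := by
    intro f l
    induction l with
    | nil => intro ks; simp
    | cons p t ih =>
      intro ks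
      rw [List.foldl_cons, ih, pv_mem_update_iff]
      simp [List.mem_cons]
      tauto
  rw [pvKeysA, gen pvLines]
  simp

-- ---------- B side: the run-counting scan ----------
def pvFlush (st : List (String × Int) × Option String × Int) : List (String × Int) :=
  match st.2.1 with | none => st.1 | some q => st.1 ++ [(q, st.2.2)]

def pvStep (st : List (String × Int) × Option String × Int) (s : String) :
    List (String × Int) × Option String × Int :=
  if st.2.1 = some s then (st.1, st.2.1, st.2.2 + 1) else (pvFlush st, some s, (1 : Int))

-- B's scan over the pairs only looks at the line component
lemma pv_scan_map (l : List (String × Int)) (st : List (String × Int) × Option String × Int) :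
    l.foldl (fun st si =>
      if st.2.1 = some si.1 then (st.1, st.2.1, st.2.2 + 1)
      else ((match st.2.1 with | none => st.1 | some q => st.1 ++ [(q, st.2.2)]), some si.1, (1 : Int))) st
    = (l.map Prod.fst).foldl pvStep st := by
  rw [List.foldl_map]
  rfl

-- run-length grouping of a list of lines
def pvGroup : List String → List (String × Int)
  | [] => []
  | x :: t => (x, 1 + ((t.takeWhile (fun y => y == x)).length : Int)) ::
      pvGroup (t.dropWhile (fun y => y == x))
termination_by l => l.length
decreasing_by
  simp only [List.length_cons]
  exact Nat.lt_succ_of_le (List.length_dropWhile_le _ t)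

lemma pv_scanAux (xs : List String) (items : List (String × Int)) (p : String) (c : Int) :
    pvFlush (xs.foldl pvStep (items, some p, c))
    = items ++ (p, c + ((xs.takeWhile (fun y => y == p)).length : Int))
        :: pvGroup (xs.dropWhile (fun y => y == p)) := by
  induction xs generalizing items p c with
  | nil => simp [pvFlush, pvGroup]
  | cons x t ih =>
    rw [List.foldl_cons]
    by_cases hp : p = x
    · subst hp
      have hstep : pvStep (items, some p, c) p = (items, some p, c + 1) := by
        simp [pvStep]
      rw [hstep, ih]
      simp
      ring
    · have hstep : pvStep (items, some p, c) x = (items ++ [(p, c)], some x, 1) := by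
        simp [pvStep, pvFlush, hp]
      rw [hstep, ih]
      have hx : (x == p) = false := by
        simp [beq_eq_false_iff_ne]; exact fun h => hp h.symm
      rw [List.takeWhile_cons, List.dropWhile_cons, hx]
      simp [pvGroup]

lemma pv_scan (xs : List String) :
    pvFlush (xs.foldl pvStep ([], none, 0)) = pvGroup xs := by
  cases xs with
  | nil => simp only [List.foldl_nil, pvFlush, pvGroup]
  | cons x t =>
    rw [List.foldl_cons]
    have hstep : pvStep ([], none, 0) x = ([], some x, 1) := by
      simp [pvStep, pvFlush]
    rw [hstep, pv_scanAux]
    simp [pvGroup]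

-- all elements the scan's dropWhile skips past are strictly above x
lemma pv_lt_dropWhile (x : String) (t : List String)
    (h1 : ∀ z ∈ t, x ≤ z) (h2 : t.Pairwise (· ≤ ·)) :
    ∀ z ∈ t.dropWhile (fun y => y == x), x < z := by
  induction t with
  | nil => intro z hz; simp at hz
  | cons y t ih =>
    rw [List.dropWhile_cons]
    by_cases hyx : y = x
    · rw [if_pos (by simp [hyx])]
      exact ih (fun z hz => h1 z (List.mem_cons_of_mem _ hz)) (List.Pairwise.sublist (List.sublist_cons_self _ _) h2)
    · rw [if_neg (by simp [hyx])]
      intro z hz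
      rcases List.mem_cons.mp hz with rfl | hz
      · exact lt_of_le_of_ne (h1 z (List.mem_cons_self)) (fun he => hyx he.symm)
      · refine lt_of_le_of_ne (h1 z (List.mem_cons_of_mem _ hz)) (fun he => ?_)
        have hyz : y ≤ z := (List.pairwise_cons.mp h2).1 z hz
        exact hyx (le_antisymm (he ▸ hyz) (h1 y List.mem_cons_self))

lemma pv_group_mem (xs : List String) (s : String) :
    s ∈ (pvGroup xs).map Prod.fst ↔ s ∈ xs := by
  induction xs using pvGroup.induct with
  | case1 => simp [pvGroup]
  | case2 x t ih =>
    rw [pvGroup]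
    simp only [List.map_cons, List.mem_cons]
    rw [ih]
    constructor
    · rintro (rfl | h)
      · exact Or.inl rfl
      · exact Or.inr ((List.dropWhile_sublist _).mem h)
    · rintro (rfl | h)
      · exact Or.inl rfl
      · conv at h => rw [← List.takeWhile_append_dropWhile (p := fun y => y == x) (l := t)]
        rcases List.mem_append.mp h with h | h
        · have hx : (s == x) = true := List.mem_takeWhile_imp (p := fun y => y == x) h
          exact Or.inl (beq_iff_eq.mp hx)
        · exact Or.inr h

lemma pv_group_nodup (xs : List String) (hs : xs.Pairwise (· ≤ ·)) :
    ((pvGroup xs).map Prod.fst).Nodup := by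
  induction xs using pvGroup.induct with
  | case1 => simp [pvGroup]
  | case2 x t ih =>
    rw [pvGroup]
    simp only [List.map_cons]
    have hcons := List.pairwise_cons.mp hs
    have hdrop : ∀ z ∈ t.dropWhile (fun y => y == x), x < z :=
      pv_lt_dropWhile x t hcons.1 hcons.2
    refine List.nodup_cons.mpr ⟨?_, ih (List.Pairwise.sublist (List.dropWhile_sublist _) hcons.2)⟩
    intro hmem
    have := hdrop x ((pv_group_mem _ x).mp hmem)
    exact lt_irrefl _ this

lemma pv_group_count (xs : List String) (hs : xs.Pairwise (· ≤ ·)) :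
    ∀ pc ∈ pvGroup xs, pc.2 = (xs.count pc.1 : Int) := by
  induction xs using pvGroup.induct with
  | case1 => simp [pvGroup]
  | case2 x t ih =>
    rw [pvGroup]
    have hcons := List.pairwise_cons.mp hs
    have hdrop : ∀ z ∈ t.dropWhile (fun y => y == x), x < z :=
      pv_lt_dropWhile x t hcons.1 hcons.2
    have hsplit : t.count x = (t.takeWhile (fun y => y == x)).length := by
      conv_lhs => rw [← List.takeWhile_append_dropWhile (p := fun y => y == x) (l := t)]
      rw [List.count_append]
      have h1 : (t.takeWhile (fun y => y == x)).count x = (t.takeWhile (fun y => y == x)).length :=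
        List.count_eq_length.mpr (fun b hb => by
          have hx : (b == x) = true := List.mem_takeWhile_imp (p := fun y => y == x) hb
          exact (beq_iff_eq.mp hx).symm)
      have h2 : (t.dropWhile (fun y => y == x)).count x = 0 :=
        List.count_eq_zero.mpr (fun hc => lt_irrefl x (hdrop x hc))
      omega
    intro pc hpc
    rcases List.mem_cons.mp hpc with rfl | hpc
    · show (1 : Int) + _ = _
      rw [List.count_cons_self, hsplit]
      push_cast; ring
    · have h2 := ih (List.Pairwise.sublist (List.dropWhile_sublist _) hcons.2) pc hpc
      rw [h2]
      have hmem : pc.1 ∈ t.dropWhile (fun y => y == x) :=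
        (pv_group_mem _ pc.1).mp (List.mem_map_of_mem hpc)
      have hne : pc.1 ≠ x := fun he => lt_irrefl x (he ▸ hdrop pc.1 hmem)
      have : (x :: t).count pc.1 = (t.dropWhile (fun y => y == x)).count pc.1 := by
        rw [List.count_cons_of_ne (fun h => hne h.symm)]
        conv_lhs => rw [← List.takeWhile_append_dropWhile (p := fun y => y == x) (l := t)]
        rw [List.count_append]
        have h0 : (t.takeWhile (fun y => y == x)).count pc.1 = 0 := by
          rw [List.count_eq_zero]
          intro hc
          have hx : (pc.1 == x) = true := List.mem_takeWhile_imp (p := fun y => y == x) hc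
          exact hne (beq_iff_eq.mp hx)
        omega
      rw [this]

-- any list whose second components are a function of the first is a map over its keys
lemma pv_map_self {β : Type} (l : List (String × β)) (f : String → β)
    (h : ∀ pc ∈ l, pc.2 = f pc.1) : l = (l.map Prod.fst).map (fun s => (s, f s)) := by
  induction l with
  | nil => rfl
  | cons pc t ih =>
    have h1 : pc.2 = f pc.1 := h pc List.mem_cons_self
    simp only [List.map_cons]
    rw [← ih (fun x hx => h x (List.mem_cons_of_mem _ hx))]
    obtain ⟨a, b⟩ := pc
    rw [show b = f a from h1]

-- enumerate's second components are the list itself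
lemma pv_enum_snd (xs : List String) : ∀ (k : Int), (PySem.List.enumerate xs k).map Prod.snd = xs := by
  induction xs with
  | nil => intro k; rw [PySem.List.enumerate_nil]; rfl
  | cons x t ih =>
    intro k
    rw [PySem.List.enumerate_cons, List.map_cons, ih]

-- Python's sort with the tuple key (k1, k2) is a sort by the lexicographic key
lemma pv_bridge1 (xs : List (String × Int)) :
    PySem.List.sorted2 xs (fun t => t.1) (fun t => t.2)
    = PySem.List.sorted xs (fun t => (toLex (t.1, t.2) : Lex (String × Int))) := by
  have hb : (fun (a b : String × Int) => decide (a.1 < b.1) || (!decide (b.1 < a.1) && decide (a.2 < b.2)))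
      = (fun a b => decide ((toLex (a.1, a.2) : Lex (String × Int)) < toLex (b.1, b.2))) := by
    funext a b
    rcases lt_trichotomy a.1 b.1 with h | h | h
    · rw [decide_eq_true h, Bool.true_or]
      exact (decide_eq_true (Prod.Lex.lt_iff.mpr (Or.inl h))).symm
    · rw [decide_eq_false (by rw [h]; exact lt_irrefl _), decide_eq_false (by rw [h]; exact lt_irrefl _)]
      simp only [Bool.not_false, Bool.true_and, Bool.false_or]
      exact decide_eq_decide.mpr (by rw [Prod.Lex.lt_iff]; constructor
                                     · exact fun h2 => Or.inr ⟨h, h2⟩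
                                     · rintro (h1 | ⟨_, h2⟩); exact absurd h1 (by rw [h]; exact lt_irrefl _); exact h2)
    · rw [decide_eq_false (lt_asymm h), decide_eq_true h]
      simp only [Bool.not_true, Bool.false_and, Bool.false_or]
      refine (decide_eq_false (fun hl => ?_)).symm
      rcases Prod.Lex.lt_iff.mp hl with h1 | ⟨he, _⟩
      · exact lt_asymm h h1
      · exact ne_of_gt h he
  simp only [PySem.List.sorted2, PySem.List.sorted, Bool.false_eq_true, if_false]
  rw [hb]

lemma pv_bridge2 (xs : List (String × Int)) :
    PySem.List.sorted2 xs (fun t => -t.2) (fun t => t.1)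
    = PySem.List.sorted xs (fun t => (toLex (-t.2, t.1) : Lex (Int × String))) := by
  have hb : (fun (a b : String × Int) => decide (-a.2 < -b.2) || (!decide (-b.2 < -a.2) && decide (a.1 < b.1)))
      = (fun a b => decide ((toLex (-a.2, a.1) : Lex (Int × String)) < toLex (-b.2, b.1))) := by
    funext a b
    rcases lt_trichotomy (-a.2) (-b.2) with h | h | h
    · rw [decide_eq_true h, Bool.true_or]
      exact (decide_eq_true (Prod.Lex.lt_iff.mpr (Or.inl h))).symm
    · rw [decide_eq_false (by rw [h]; exact lt_irrefl _), decide_eq_false (by rw [h]; exact lt_irrefl _)]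
      simp only [Bool.not_false, Bool.true_and, Bool.false_or]
      exact decide_eq_decide.mpr (by rw [Prod.Lex.lt_iff]; constructor
                                     · exact fun h2 => Or.inr ⟨h, h2⟩
                                     · rintro (h1 | ⟨_, h2⟩); exact absurd h1 (by rw [h]; exact lt_irrefl _); exact h2)
    · rw [decide_eq_false (lt_asymm h), decide_eq_true h]
      simp only [Bool.not_true, Bool.false_and, Bool.false_or]
      refine (decide_eq_false (fun hl => ?_)).symm
      rcases Prod.Lex.lt_iff.mp hl with h1 | ⟨he, _⟩
      · exact lt_asymm h h1
      · exact ne_of_gt h he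
  simp only [PySem.List.sorted2, PySem.List.sorted, Bool.false_eq_true, if_false]
  rw [hb]

-- the number of distinct (line, page) pairs with line s is the number of pages containing s
lemma pv_count (pages : List String) (s : String) :
    ((PySem.Set.ofList (pvAllPairs pages)).countP (fun pr => pr.1 == s) : Int) = pvCnt pages s := by
  have hmemall : ∀ pr : String × Int, pr ∈ pvAllPairs pages ↔
      ∃ ip ∈ PySem.List.enumerate pages, pr.2 = ip.1 ∧ pr.1 ∈ pvLines ip.2 := by
    intro pr
    unfold pvAllPairs
    rw [List.mem_flatMap]
    constructor
    · rintro ⟨ip, hip, hm⟩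
      rcases List.mem_map.mp hm with ⟨s', hs', rfl⟩
      exact ⟨ip, hip, rfl, hs'⟩
    · rintro ⟨ip, hip, h2, h1⟩
      exact ⟨ip, hip, List.mem_map.mpr ⟨pr.1, h1, by rw [← h2]⟩⟩
  have hperm : ((PySem.Set.ofList (pvAllPairs pages)).filter (fun pr => pr.1 == s)).Perm
      (((PySem.List.enumerate pages).filter (fun ip => decide (s ∈ pvLines ip.2))).map (fun ip => (s, ip.1))) := by
    rw [List.perm_ext_iff_of_nodup (List.Nodup.filter _ (PySem.Set.nodup_ofList _)) ?nd]
    case nd =>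
      have h1 : (((PySem.List.enumerate pages).filter (fun ip => decide (s ∈ pvLines ip.2))).map Prod.fst).Pairwise (· < ·) :=
        List.Pairwise.sublist (List.Sublist.map _ List.filter_sublist)
          (List.pairwise_map.mpr (PySem.List.pairwise_lt_enumerate pages 0))
      have h2 : (((PySem.List.enumerate pages).filter (fun ip => decide (s ∈ pvLines ip.2))).map Prod.fst).Nodup :=
        h1.imp ne_of_lt
      have h3 := h2.map (f := fun i => (s, i)) (fun a b h => by simpa using h)
      rw [List.map_map] at h3
      exact h3
    intro pr
    rw [List.mem_filter, PySem.Set.mem_ofList, hmemall pr, List.mem_map]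
    constructor
    · rintro ⟨⟨ip, hip, h2, h1⟩, hbeq⟩
      have hs : pr.1 = s := beq_iff_eq.mp hbeq
      refine ⟨ip, List.mem_filter.mpr ⟨hip, by simpa [← hs] using h1⟩, ?_⟩
      cases pr; simp_all
    · rintro ⟨ip, hip, rfl⟩
      rcases List.mem_filter.mp hip with ⟨hip', hval⟩
      exact ⟨⟨ip, hip', rfl, by simpa using hval⟩, by simp⟩
  have hlen := hperm.length_eq
  rw [List.length_map] at hlen
  rw [← List.countP_eq_length_filter] at hlen
  rw [hlen]
  unfold pvCnt
  congr 1
  rw [← List.countP_eq_length_filter]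
  conv_rhs => rw [← pv_enum_snd pages 0]
  rw [List.countP_map]
  rfl
-- ===== VERDICT (by name: the statement is the Claim_ definition above) =====
theorem detect_watermark_candidates_with_counts_spec : Claim_equal_detect_watermark_candidates_with_counts := by
  intro pages _
  show PySem.List.sorted2 ((pvFoldA pages PySem.Dict.empty).items) (fun t => -t.2) (fun t => t.1)
      = detect_watermark_candidates_with_counts_alt pages
  set X : List String :=
    (PySem.List.sorted2 (PySem.Set.ofList (pvAllPairs pages)) (fun t => t.1) (fun t => t.2)).map Prod.fst
    with hXdef
  -- the sorted deduplicated pairs are a permutation of set(pairs)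
  have hpermSP : (PySem.List.sorted2 (PySem.Set.ofList (pvAllPairs pages)) (fun t => t.1) (fun t => t.2)).Perm
      (PySem.Set.ofList (pvAllPairs pages)) := PySem.List.sorted2_perm _ _ _ _
  -- the line components of the sorted pairs are weakly sorted
  have hsorted : X.Pairwise (· ≤ ·) := by
    rw [hXdef, pv_bridge1, List.pairwise_map]
    refine (PySem.List.sorted_pairwise (PySem.Set.ofList (pvAllPairs pages))
      (fun t => (toLex (t.1, t.2) : Lex (String × Int)))).imp ?_
    intro a b hab
    rcases Prod.Lex.le_iff.mp hab with h | ⟨h, _⟩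
    · exact le_of_lt h
    · exact le_of_eq h
  -- every run count B produces is the page count of that line
  have hcount : ∀ s : String, ((X.count s : Nat) : Int) = pvCnt pages s := by
    intro s
    rw [hXdef, List.count_eq_countP, List.countP_map,
        List.Perm.countP_eq _ hpermSP]
    exact pv_count pages s
  have hItemsB : pvGroup X = ((pvGroup X).map Prod.fst).map (fun s => (s, pvCnt pages s)) := by
    apply pv_map_self
    intro pc hpc
    rw [pv_group_count X hsorted pc hpc]
    exact hcount pc.1
  -- A's items
  have hnodupKA : (pvFoldA pages PySem.Dict.empty).keys.Nodup :=
    pv_foldA_nodup pages _ List.nodup_nil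
  have hkeysEq : (pvFoldA pages PySem.Dict.empty).keys = pvKeysA pages := by
    rw [pv_foldA_keys]; rfl
  have hnodupKA' : (pvKeysA pages).Nodup := hkeysEq ▸ hnodupKA
  have hitemsA : (pvFoldA pages PySem.Dict.empty).items
      = (pvKeysA pages).map (fun s => (s, pvCnt pages s)) := by
    rw [PySem.Dict.items_eq_map_keys _ hnodupKA 0, hkeysEq]
    apply List.map_congr_left
    intro s _
    rw [pv_foldA_getD]
    norm_num
  -- the two key lists contain the same lines
  have hmemX : ∀ s : String, s ∈ X ↔ ∃ p ∈ pages, s ∈ pvLines p := by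
    intro s
    rw [hXdef]
    constructor
    · intro hsX
      rcases List.mem_map.mp hsX with ⟨pr, hpr, rfl⟩
      have h1 : pr ∈ pvAllPairs pages :=
        (PySem.Set.mem_ofList _ _).mp ((List.Perm.mem_iff hpermSP).mp hpr)
      rcases List.mem_flatMap.mp h1 with ⟨ip, hip, hm⟩
      rcases List.mem_map.mp hm with ⟨s', hs', heq⟩
      have hp2 : ip.2 ∈ pages := by
        have h3 := List.mem_map_of_mem (f := Prod.snd) hip
        rw [pv_enum_snd pages 0] at h3
        exact h3
      exact ⟨ip.2, hp2, by rw [← heq]; exact hs'⟩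
    · rintro ⟨p, hp, hsp⟩
      obtain ⟨k, hk, hpk⟩ := List.mem_iff_getElem.mp hp
      have hip : (((0 : Int) + (k : Int)), pages[k]) ∈ PySem.List.enumerate pages 0 :=
        (PySem.List.mem_enumerate_iff pages 0 _).mpr ⟨k, hk, rfl⟩
      have hpair : (s, (0 : Int) + (k : Int)) ∈ pvAllPairs pages :=
        List.mem_flatMap.mpr ⟨((0 : Int) + (k : Int), pages[k]), hip,
          List.mem_map.mpr ⟨s, by rw [hpk]; exact hsp, rfl⟩⟩
      exact List.mem_map.mpr ⟨(s, (0 : Int) + (k : Int)),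
        (List.Perm.mem_iff hpermSP).mpr ((PySem.Set.mem_ofList _ _).mpr hpair), rfl⟩
  have hpermKeys : (pvKeysA pages).Perm ((pvGroup X).map Prod.fst) := by
    rw [List.perm_ext_iff_of_nodup hnodupKA' (pv_group_nodup X hsorted)]
    intro s
    rw [pv_mem_keysA pages s, pv_group_mem X s, hmemX s]
  have hpermItems : ((pvFoldA pages PySem.Dict.empty).items).Perm (pvGroup X) := by
    rw [hitemsA]
    conv_rhs => rw [hItemsB]
    exact hpermKeys.map _
  -- both programs apply the same total sort key, so the permutation forces equality
  have hfin : PySem.List.sorted2 ((pvFoldA pages PySem.Dict.empty).items) (fun t => -t.2) (fun t => t.1)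
      = PySem.List.sorted2 (pvGroup X) (fun t => -t.2) (fun t => t.1) := by
    rw [pv_bridge2, pv_bridge2]
    have hys := PySem.List.sorted_perm ((pvFoldA pages PySem.Dict.empty).items)
      (fun t => (toLex (-t.2, t.1) : Lex (Int × String))) false
    have hpair := PySem.List.sorted_pairwise ((pvFoldA pages PySem.Dict.empty).items)
      (fun t => (toLex (-t.2, t.1) : Lex (Int × String)))
    have hnodupItemsA : ((pvFoldA pages PySem.Dict.empty).items).Nodup := by
      rw [hitemsA]
      exact hnodupKA'.map (fun a b h => congrArg Prod.fst h)
    have hnodupYs := (List.Perm.nodup_iff hys).mpr hnodupItemsA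
    have hstrict : (PySem.List.sorted ((pvFoldA pages PySem.Dict.empty).items)
        (fun t => (toLex (-t.2, t.1) : Lex (Int × String))) false).Pairwise
        (fun a b => (toLex (-a.2, a.1) : Lex (Int × String)) < toLex (-b.2, b.1)) := by
      refine (hpair.and hnodupYs).imp ?_
      rintro a b ⟨hle, hne⟩
      refine lt_of_le_of_ne hle (fun hk => hne ?_)
      have h1 := congrArg ofLex hk
      have h2 : -a.2 = -b.2 := congrArg Prod.fst h1
      have h3 : a.1 = b.1 := congrArg Prod.snd h1
      exact Prod.ext h3 (neg_inj.mp h2)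
    exact (PySem.List.sorted_eq_of_perm_of_pairwise_lt (pvGroup X) _
      (fun t => (toLex (-t.2, t.1) : Lex (Int × String))) (hys.trans hpermItems) hstrict).symm
  have hB : detect_watermark_candidates_with_counts_alt pages
      = PySem.List.sorted2 (pvGroup X) (fun t => -t.2) (fun t => t.1) := by
    unfold detect_watermark_candidates_with_counts_alt
    simp only []
    rw [pv_pairs, pv_scan_map]
    show PySem.List.sorted2 (pvFlush (X.foldl pvStep ([], none, 0))) (fun t => -t.2) (fun t => t.1) = _
    rw [pv_scan]
  rw [hB]
  exact hfin
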